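-- pv_equiv track=rewrite | github.com/Virtualhaggis/usecaseintel | biweekly_review.py | _sample_cluster
-- ===== SOURCE A (Python) =====
-- from collections import Counter, defaultdict
--
-- def _sample_cluster(arts: list[dict], max_articles: int = 12) -> list[dict]:
--     """Cap a cluster's articles at max_articles. Prefer source-diversity
--     (don't feed the LLM 12 articles from THN — feed 2 from THN, 2 from
--     BleepingComputer, 2 from ESET, etc.) to maximise the cross-source
--     corroboration signal that justifies a high-confidence weekly UC."""
--     if len(arts) <= max_articles:
--         return arts
--     by_source: dict[str, list[dict]] = defaultdict(list)
--     for a in arts: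
--         by_source[a.get("source") or "Unknown"].append(a)
--     # Round-robin pick, prefer more-recent within each source
--     for src in by_source:
--         by_source[src].sort(key=lambda x: x.get("published", ""), reverse=True)
--     picked: list[dict] = []
--     while len(picked) < max_articles:
--         progress = False
--         for src in list(by_source.keys()):
--             if by_source[src]:
--                 picked.append(by_source[src].pop(0))
--                 progress = True
--                 if len(picked) >= max_articles:
--                     break
--         if not progress:
--             break
--     return picked
-- ===== SOURCE B (Python) =====
-- def _sample_cluster(arts: list[dict], max_articles: int = 12) -> list[dict]:
--     """Same cap-with-source-diversity sampling, but non-destructively: index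
--     each recency-sorted group and do ONE global stable sort by within-group
--     rank instead of A's pop-based round-robin while loop."""
--     if len(arts) <= max_articles:
--         return arts
--     groups: dict[str, list[dict]] = {}
--     for a in arts:
--         groups.setdefault(a.get("source") or "Unknown", []).append(a)
--     flat = [((i, j), a)
--             for j, g in enumerate(groups.values())
--             for i, a in enumerate(sorted(g, key=lambda x: x.get("published", ""), reverse=True))]
--     flat.sort(key=lambda t: t[0])
--     return [a for _, a in flat[:max(0, max_articles)]]
-- ===== Notes on version B (the rewrite author's own statement) =====
-- stated objective: alternative
-- what changed: Replaces A's destructive pop(0)-based round-robin while loop (repeated passes over the source dict with a progress flag) by a non-destructive formulation: tag each article of every recency-sorted group with its (within-group index, group order) pair, do one global stable sort on that key, and take the first max(0, max_articles) articles.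
import Mathlib
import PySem

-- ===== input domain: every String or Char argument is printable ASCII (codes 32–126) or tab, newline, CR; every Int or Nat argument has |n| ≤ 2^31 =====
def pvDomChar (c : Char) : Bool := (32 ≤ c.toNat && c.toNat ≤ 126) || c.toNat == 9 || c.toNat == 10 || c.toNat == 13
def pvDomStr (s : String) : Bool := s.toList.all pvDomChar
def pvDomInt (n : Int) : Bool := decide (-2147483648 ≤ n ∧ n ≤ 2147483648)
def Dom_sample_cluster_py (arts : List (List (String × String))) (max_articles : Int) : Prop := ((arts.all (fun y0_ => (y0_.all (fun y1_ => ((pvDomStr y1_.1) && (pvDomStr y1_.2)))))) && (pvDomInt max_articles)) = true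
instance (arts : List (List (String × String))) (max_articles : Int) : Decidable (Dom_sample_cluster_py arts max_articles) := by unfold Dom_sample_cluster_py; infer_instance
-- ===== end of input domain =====

-- B replaces A's destructive pop-based round-robin while loop by indexing each
-- recency-sorted group and doing one global stable sort on (within-group rank,
-- group order); same return value, alternative algorithm (return value only —
-- neither implementation mutates its argument observably from the caller).

-- ===== PORT A =====
-- shared with port B: both Pythons read fields the same way and build the same
-- source grouping (defaultdict-append in A, setdefault-append in B)

-- a.get(k) on an article dict (first match in the association list)
def pvGetStr (a : List (String × String)) (k : String) : Option String :=
  (List.find? (fun p => p.1 == k) a).map (fun p => p.2)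

-- a.get("source") or "Unknown"  (None and "" are falsy)
def pvSrc (a : List (String × String)) : String :=
  match pvGetStr a "source" with
  | some s => if s = "" then "Unknown" else s
  | none => "Unknown"

-- a.get("published", "")
def pvPub (a : List (String × String)) : String :=
  (pvGetStr a "published").getD ""

-- the grouping loop: for a in arts: by_source[a.get("source") or "Unknown"].append(a)
def pvGroup (arts : List (List (String × String))) : PySem.Dict String (List (List (String × String))) :=
  arts.foldl (fun d a => d.insert (pvSrc a) (d.getD (pvSrc a) [] ++ [a])) PySem.Dict.empty

-- for src in by_source: by_source[src].sort(key=..., reverse=True)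
def pvSortVals (d : PySem.Dict String (List (List (String × String)))) :
    PySem.Dict String (List (List (String × String))) :=
  d.keys.foldl (fun d' src => d'.insert src (PySem.List.sorted (d'.getD src []) pvPub true)) d

-- the inner 'for src in list(by_source.keys())' with its break
def pvInnerA (m : Int) : List String → PySem.Dict String (List (List (String × String))) →
    List (List (String × String)) → Bool →
    PySem.Dict String (List (List (String × String))) × List (List (String × String)) × Bool
  | [], d, picked, progress => (d, picked, progress)
  | src :: rest, d, picked, progress =>
    match d.get? src with
    | some (a :: t) =>
      let d' := d.insert src t
      let picked' := picked ++ [a]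
      if m ≤ (picked'.length : Int) then (d', picked', true)
      else pvInnerA m rest d' picked' true
    | _ => pvInnerA m rest d picked progress

-- the outer 'while len(picked) < max_articles' (fuel-bounded; the fuel passed
-- below always suffices, so this computes exactly what the while loop computes)
def pvOuterA (fuel : Nat) (m : Int) (d : PySem.Dict String (List (List (String × String))))
    (picked : List (List (String × String))) : List (List (String × String)) :=
  match fuel with
  | 0 => picked
  | fuel + 1 =>
    if (picked.length : Int) < m then
      match pvInnerA m d.keys d picked false with
      | (d', picked', progress) => if progress then pvOuterA fuel m d' picked' else picked'
    else picked

def sample_cluster_py (arts : List (List (String × String))) (max_articles : Int) :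
    List (List (String × String)) :=
  if (arts.length : Int) ≤ max_articles then arts
  else pvOuterA (arts.length + 1) max_articles (pvSortVals (pvGroup arts)) []

-- ===== PORT B =====
def sample_cluster_py_alt (arts : List (List (String × String))) (max_articles : Int) :
    List (List (String × String)) :=
  if (arts.length : Int) ≤ max_articles then arts
  else
    let flat := (pvGroup arts).values.zipIdx.flatMap (fun gj =>
      ((PySem.List.sorted gj.1 pvPub true).zipIdx).map (fun ai => ((ai.2, gj.2), ai.1)))
    let srt := PySem.List.sorted flat (fun t => (toLex t.1 : Lex (Nat × Nat)))
    (PySem.List.slice srt none (some (max 0 max_articles))).map (fun t => t.2)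

-- ===== PRECONDITION & SPEC =====
def Spec_sample_cluster_py (arts : List (List (String × String))) (max_articles : Int) (out : List (List (String × String))) : Prop := out = sample_cluster_py_alt arts max_articles
instance (arts : List (List (String × String))) (max_articles : Int) (out : List (List (String × String))) : Decidable (Spec_sample_cluster_py arts max_articles out) := by unfold Spec_sample_cluster_py; infer_instance

-- ===== CLAIM (what is proved, stated in full; the proofs are below) =====
def Claim_equal_sample_cluster_py : Prop := ∀ (arts : List (List (String × String))) (max_articles : Int), Dom_sample_cluster_py arts max_articles → Spec_sample_cluster_py arts max_articles (sample_cluster_py arts max_articles)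

-- ===== LEMMAS AND PROOFS =====
-- notation shortcut for proofs
abbrev pvArt := List (String × String)

-- total number of articles held in a list of groups
def pvSumLen {α : Type} (gs : List (List α)) : Nat := (gs.map List.length).sum

lemma pvSumLen_tail_le {α : Type} (gs : List (List α)) :
    pvSumLen (gs.map List.tail) ≤ pvSumLen gs := by
  induction gs with
  | nil => simp [pvSumLen]
  | cons g rest ih =>
    simp only [pvSumLen, List.map_cons, List.sum_cons] at *
    have : g.tail.length ≤ g.length := by cases g <;> simp
    omega

lemma pvSumLen_tail_lt {α : Type} (gs : List (List α))
    (h : ¬ gs.all (fun g => g.isEmpty) = true) :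
    pvSumLen (gs.map List.tail) < pvSumLen gs := by
  induction gs with
  | nil => simp at h
  | cons g rest ih =>
    simp only [List.all_cons, Bool.and_eq_true] at h
    by_cases hg : g.isEmpty = true
    · have hrest := ih (by tauto)
      simp only [pvSumLen, List.map_cons, List.sum_cons] at *
      have : g.tail.length ≤ g.length := by cases g <;> simp
      omega
    · have hlt : g.tail.length < g.length := by
        cases g with
        | nil => simp at hg
        | cons a t => simp
      have hle := pvSumLen_tail_le rest
      simp only [pvSumLen, List.map_cons, List.sum_cons] at *
      omega

-- the round-robin order as a pure function: one round of heads, then recurse on tails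
def pvRR {α : Type} (gs : List (List α)) : List α :=
  if h : gs.all (fun g => g.isEmpty) = true then []
  else gs.filterMap List.head? ++ pvRR (gs.map List.tail)
termination_by pvSumLen gs
decreasing_by exact pvSumLen_tail_lt gs h

-- the same rounds, with each article tagged by its (within-group index, group index)
def pvHeadsK {α : Type} (i : Nat) : Nat → List (List α) → List ((Nat × Nat) × α)
  | _, [] => []
  | j, g :: rest => (g.head?.map (fun a => ((i, j), a))).toList ++ pvHeadsK i (j + 1) rest

def pvRRK {α : Type} (i : Nat) (gs : List (List α)) : List ((Nat × Nat) × α) :=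
  if h : gs.all (fun g => g.isEmpty) = true then []
  else pvHeadsK i 0 gs ++ pvRRK (i + 1) (gs.map List.tail)
termination_by pvSumLen gs
decreasing_by simpa using pvSumLen_tail_lt gs h

-- B's flattened, group-major list of ((i, j), article) tuples, as a recursion
def pvFlatB {α : Type} (i : Nat) : Nat → List (List α) → List ((Nat × Nat) × α)
  | _, [] => []
  | j, g :: rest => ((g.zipIdx i).map (fun ai => ((ai.2, j), ai.1))) ++ pvFlatB i (j + 1) rest

-- ---- association-list facts (keys are Nodup for every dict A or B builds) ----
lemma pvFind_nodup {β : Type} (its : List (String × β)) (p : String × β)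
    (hnd : (its.map Prod.fst).Nodup) (hp : p ∈ its) :
    its.find? (fun q => q.1 == p.1) = some p := by
  induction its with
  | nil => cases hp
  | cons q rest ih =>
    simp only [List.map_cons, List.nodup_cons] at hnd
    rcases List.mem_cons.mp hp with rfl | hmem
    · rw [List.find?_cons_of_pos (by simp)]
    · have hne : (q.1 == p.1) = false := by
        simp only [beq_eq_false_iff_ne]
        intro h
        exact hnd.1 (h ▸ List.mem_map_of_mem hmem)
      rw [List.find?_cons_of_neg (by simp [hne])]
      exact ih hnd.2 hmem

lemma pvKeys_replace {β : Type} (its : List (String × β)) (src : String) (w : β) :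
    ((its.map (fun p => if p.1 == src then (src, w) else p)).map Prod.fst) = its.map Prod.fst := by
  rw [List.map_map]
  apply List.map_congr_left
  intro p _
  by_cases h : p.1 = src <;> simp [h]

lemma pvFind_replace_ne {β : Type} (its : List (String × β)) (src : String) (w : β)
    (k : String) (hk : k ≠ src) :
    List.find? (fun q => q.1 == k) (its.map (fun p => if p.1 == src then (src, w) else p))
      = List.find? (fun q => q.1 == k) its := by
  induction its with
  | nil => simp
  | cons q rest ih =>
    by_cases hq : q.1 = src
    · have h1 : ((src : String) == k) = false := by
        rw [beq_eq_false_iff_ne]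
        exact fun h => hk h.symm
      have h2 : (q.1 == k) = false := by
        rw [beq_eq_false_iff_ne, hq]
        exact fun h => hk h.symm
      simp only [List.map_cons, if_pos (by simp [hq] : (q.1 == src) = true)]
      simp only [List.find?_cons, h1, h2]
      exact ih
    · simp only [List.map_cons, if_neg (by simp [hq] : ¬ (q.1 == src) = true)]
      by_cases hqk : (q.1 == k) = true
      · simp only [List.find?_cons, hqk]
      · simp only [List.find?_cons, (by simp_all : (q.1 == k) = false)]
        exact ih

lemma pvGetD_replace_ne (its : List (String × List pvArt)) (src : String) (w : List pvArt)
    (k : String) (hk : k ≠ src) :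
    (PySem.Dict.mk (its.map (fun p => if p.1 == src then (src, w) else p))).getD k []
      = (PySem.Dict.mk its).getD k [] := by
  simp only [PySem.Dict.getD, PySem.Dict.get?]
  rw [pvFind_replace_ne its src w k hk]

lemma pvHeads_nil_iff {α : Type} (gs : List (List α)) :
    gs.filterMap List.head? = [] ↔ gs.all (fun g => g.isEmpty) = true := by
  rw [List.filterMap_eq_nil_iff, List.all_eq_true]
  constructor
  · intro h g hg
    have := h g hg
    rw [List.head?_eq_none_iff] at this
    simp [this]
  · intro h g hg
    have := h g hg
    rw [List.head?_eq_none_iff]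
    cases g with
    | nil => rfl
    | cons a t => simp at this

lemma pvSumLen_tail_add_heads {α : Type} (gs : List (List α)) :
    pvSumLen (gs.map List.tail) + (gs.filterMap List.head?).length = pvSumLen gs := by
  induction gs with
  | nil => simp [pvSumLen]
  | cons g rest ih =>
    cases g with
    | nil => simpa [pvSumLen, List.filterMap_cons] using ih
    | cons a t =>
      simp only [pvSumLen, List.map_cons, List.sum_cons, List.filterMap_cons] at *
      simp only [List.head?_cons, Option.some.injEq, List.length_cons, List.tail_cons]
      omega

-- heads over the full key list are the heads of the value lists
lemma pvHeadsOf_keys (its : List (String × List pvArt)) (hnd : (its.map Prod.fst).Nodup) :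
    (its.map Prod.fst).filterMap (fun k => ((PySem.Dict.mk its).getD k []).head?)
      = (its.map Prod.snd).filterMap List.head? := by
  rw [List.filterMap_map, List.filterMap_map]
  apply List.filterMap_congr
  intro p hp
  simp [Function.comp, PySem.Dict.getD, PySem.Dict.get?, pvFind_nodup its p hnd hp]

-- ---- the grouping fold: one step ----
lemma pvSum_replace_append (its : List (String × List pvArt)) (k : String) (a : pvArt)
    (hnd : (its.map Prod.fst).Nodup) (hk : k ∈ its.map Prod.fst) :
    pvSumLen (((its.map (fun p => if p.1 == k then (k, (PySem.Dict.mk its).getD k [] ++ [a]) else p)).map Prod.snd))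
      = pvSumLen (its.map Prod.snd) + 1 := by
  induction its with
  | nil => cases hk
  | cons q rest ih =>
    simp only [List.map_cons, List.nodup_cons] at hnd
    by_cases hq : q.1 = k
    · have hget : (PySem.Dict.mk (q :: rest)).getD k [] = q.2 := by
        simp [PySem.Dict.getD, PySem.Dict.get?, List.find?_cons, hq]
      have hrest : rest.map (fun p => if p.1 == k then (k, (PySem.Dict.mk (q :: rest)).getD k [] ++ [a]) else p) = rest := by
        conv_rhs => rw [← List.map_id rest]
        apply List.map_congr_left
        intro p hp
        have : p.1 ≠ k := by
          intro h
          have hm1 : p.1 ∈ rest.map Prod.fst := List.mem_map_of_mem hp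
          rw [h, ← hq] at hm1
          exact hnd.1 hm1
        simp [this]
      have hbq : (q.1 == k) = true := by simp [hq]
      rw [List.map_cons, hrest, if_pos hbq, hget]
      simp only [pvSumLen, List.map_cons, List.sum_cons, List.length_append,
        List.length_cons, List.length_nil]
      omega
    · have hbq : (q.1 == k) = false := by simp [hq]
      have hget : (PySem.Dict.mk (q :: rest)).getD k [] = (PySem.Dict.mk rest).getD k [] := by
        simp only [PySem.Dict.getD, PySem.Dict.get?, List.find?_cons, hbq]
      have hk' : k ∈ rest.map Prod.fst := by
        rcases List.mem_cons.mp hk with h | h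
        · exact absurd h.symm hq
        · exact h
      have hih := ih hnd.2 hk'
      rw [List.map_cons, if_neg (by simp [hbq]), hget]
      simp only [pvSumLen, List.map_cons, List.sum_cons] at *
      omega

lemma pvGroup_aux (arts : List pvArt) :
    ∀ its : List (String × List pvArt), (its.map Prod.fst).Nodup →
    (((arts.foldl (fun d a => d.insert (pvSrc a) (d.getD (pvSrc a) [] ++ [a])) (PySem.Dict.mk its)).items.map Prod.fst).Nodup ∧
      pvSumLen ((arts.foldl (fun d a => d.insert (pvSrc a) (d.getD (pvSrc a) [] ++ [a])) (PySem.Dict.mk its)).items.map Prod.snd)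
        = pvSumLen (its.map Prod.snd) + arts.length) := by
  induction arts with
  | nil => intro its hnd; simpa using hnd
  | cons a rest ih =>
    intro its hnd
    simp only [List.foldl_cons]
    by_cases hc : (PySem.Dict.mk its).contains (pvSrc a) = true
    · have hkmem : pvSrc a ∈ its.map Prod.fst := by
        simp only [PySem.Dict.contains, List.any_eq_true] at hc
        obtain ⟨p, hp, hpk⟩ := hc
        exact (eq_of_beq hpk) ▸ List.mem_map_of_mem hp
      have hins : (PySem.Dict.mk its).insert (pvSrc a) ((PySem.Dict.mk its).getD (pvSrc a) [] ++ [a])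
          = PySem.Dict.mk (its.map (fun p => if p.1 == pvSrc a then (pvSrc a, (PySem.Dict.mk its).getD (pvSrc a) [] ++ [a]) else p)) := by
        simp [PySem.Dict.insert, hc]
      rw [hins]
      have hnd' : ((its.map (fun p => if p.1 == pvSrc a then (pvSrc a, (PySem.Dict.mk its).getD (pvSrc a) [] ++ [a]) else p)).map Prod.fst).Nodup := by
        rw [pvKeys_replace]; exact hnd
      obtain ⟨h1, h2⟩ := ih _ hnd'
      refine ⟨h1, ?_⟩
      rw [h2, pvSum_replace_append its (pvSrc a) a hnd hkmem]
      simp [List.length_cons]; ring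
    · have hkno : pvSrc a ∉ its.map Prod.fst := by
        intro hmem
        apply hc
        simp only [PySem.Dict.contains, List.any_eq_true]
        obtain ⟨p, hp, hpk⟩ := List.mem_map.mp hmem
        exact ⟨p, hp, by simp [hpk]⟩
      have hfind : its.find? (fun p => p.1 == pvSrc a) = none := by
        rw [List.find?_eq_none]
        intro p hp
        simp only [Bool.not_eq_true, beq_eq_false_iff_ne]
        intro h
        exact hkno (h ▸ List.mem_map_of_mem hp)
      have hgetD : (PySem.Dict.mk its).getD (pvSrc a) [] = [] := by
        simp [PySem.Dict.getD, PySem.Dict.get?, hfind]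
      have hins : (PySem.Dict.mk its).insert (pvSrc a) ((PySem.Dict.mk its).getD (pvSrc a) [] ++ [a])
          = PySem.Dict.mk (its ++ [(pvSrc a, [a])]) := by
        simp [PySem.Dict.insert, hc, hgetD]
      rw [hins]
      have hnd' : (((its ++ [(pvSrc a, [a])]).map Prod.fst)).Nodup := by
        simp only [List.map_append, List.map_cons, List.map_nil]
        rw [(List.perm_append_comm).nodup_iff]
        rw [List.singleton_append, List.nodup_cons]
        exact ⟨hkno, hnd⟩
      obtain ⟨h1, h2⟩ := ih _ hnd'
      refine ⟨h1, ?_⟩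
      rw [h2]
      simp [pvSumLen, List.length_cons]; ring

lemma pvGroup_keys_nodup (arts : List pvArt) : (pvGroup arts).keys.Nodup := by
  have := (pvGroup_aux arts [] (by simp)).1
  simpa [pvGroup, PySem.Dict.empty, PySem.Dict.keys] using this

lemma pvGroup_sumLen (arts : List pvArt) :
    pvSumLen (pvGroup arts).values = arts.length := by
  have := (pvGroup_aux arts [] (by simp)).2
  simpa [pvGroup, PySem.Dict.empty, PySem.Dict.values, pvSumLen] using this

-- ---- the per-source sort pass rewrites every value in place ----
lemma pvSortFold_items : ∀ (ks : List String) (its : List (String × List pvArt)),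
    (its.map Prod.fst).Nodup → ks.Nodup → (∀ k ∈ ks, k ∈ its.map Prod.fst) →
    (ks.foldl (fun d' src => d'.insert src (PySem.List.sorted (d'.getD src []) pvPub true)) (PySem.Dict.mk its)).items
      = its.map (fun p => if p.1 ∈ ks then (p.1, PySem.List.sorted p.2 pvPub true) else p) := by
  intro ks
  induction ks with
  | nil => intro its _ _ _; simp
  | cons src rest ih =>
    intro its hnd hksnd hks
    obtain ⟨hsrc_nr, hrest_nd⟩ := List.nodup_cons.mp hksnd
    obtain ⟨p0, hp0, hp0k⟩ := List.mem_map.mp (hks src (by simp))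
    have hfind : its.find? (fun q => q.1 == src) = some p0 := hp0k ▸ pvFind_nodup its p0 hnd hp0
    have hgetD : (PySem.Dict.mk its).getD src [] = p0.2 := by
      simp [PySem.Dict.getD, PySem.Dict.get?, hfind]
    have hc : (PySem.Dict.mk its).contains src = true := by
      simp only [PySem.Dict.contains, List.any_eq_true]
      exact ⟨p0, hp0, by simp [hp0k]⟩
    have hins : (PySem.Dict.mk its).insert src (PySem.List.sorted ((PySem.Dict.mk its).getD src []) pvPub true)
        = PySem.Dict.mk (its.map (fun p => if p.1 == src then (src, PySem.List.sorted p0.2 pvPub true) else p)) := by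
      simp [PySem.Dict.insert, hc, hgetD]
    simp only [List.foldl_cons, hins]
    set its1 := its.map (fun p => if p.1 == src then (src, PySem.List.sorted p0.2 pvPub true) else p) with hits1
    have hnd1 : (its1.map Prod.fst).Nodup := by rw [hits1, pvKeys_replace]; exact hnd
    have hks1 : ∀ k ∈ rest, k ∈ its1.map Prod.fst := by
      intro k hk
      rw [hits1, pvKeys_replace]
      exact hks k (List.mem_cons_of_mem _ hk)
    rw [ih its1 hnd1 hrest_nd hks1, hits1, List.map_map]
    apply List.map_congr_left
    intro p hp
    by_cases hpsrc : p.1 = src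
    · have hpeq : p = p0 := by
        have := pvFind_nodup its p hnd hp
        rw [hpsrc, hfind] at this
        exact (Option.some_inj.mp this).symm
      have : (p.1 == src) = true := by simp [hpsrc]
      simp only [Function.comp, this, if_pos]
      have hsrc_nr' : src ∉ rest := hsrc_nr
      have hp01 : p0.1 = src := hpeq ▸ hpsrc
      simp [hsrc_nr', hp01, hpeq]
    · have : (p.1 == src) = false := by simp [hpsrc]
      simp only [Function.comp, this]
      simp [hpsrc]

lemma pvSortVals_items (d : PySem.Dict String (List pvArt)) (hnd : d.keys.Nodup) :
    (pvSortVals d).items = d.items.map (fun p => (p.1, PySem.List.sorted p.2 pvPub true)) := by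
  obtain ⟨its⟩ := d
  have hnd' : (its.map Prod.fst).Nodup := hnd
  rw [pvSortVals]
  have : (PySem.Dict.mk its).keys = its.map Prod.fst := rfl
  rw [this, pvSortFold_items (its.map Prod.fst) its hnd' hnd' (fun k hk => hk)]
  apply List.map_congr_left
  intro p hp
  simp [List.mem_map_of_mem hp]

-- heads of a key list, used to state the inner-loop lemma
def pvHeadsOf (ks : List String) (its : List (String × List pvArt)) : List pvArt :=
  ks.filterMap (fun k => ((PySem.Dict.mk its).getD k []).head?)

-- ---- the inner for loop ----
lemma pvInnerA_spec (m : Int) (ks : List String) (its : List (String × List pvArt))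
    (picked : List pvArt) (pg : Bool)
    (hnd : (its.map Prod.fst).Nodup) (hks : ∀ k ∈ ks, k ∈ its.map Prod.fst)
    (hksnd : ks.Nodup) (hlen : picked.length < m.toNat) :
    (pvInnerA m ks (PySem.Dict.mk its) picked pg).2.1 = (picked ++ pvHeadsOf ks its).take m.toNat ∧
    (pvInnerA m ks (PySem.Dict.mk its) picked pg).2.2 = (pg || !(pvHeadsOf ks its).isEmpty) ∧
    ((picked ++ pvHeadsOf ks its).length < m.toNat →
      (pvInnerA m ks (PySem.Dict.mk its) picked pg).1.items
        = its.map (fun p => if p.1 ∈ ks then (p.1, p.2.tail) else p)) := by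
  induction ks generalizing its picked pg with
  | nil =>
    refine ⟨?_, by simp [pvInnerA, pvHeadsOf], ?_⟩
    · simp only [pvInnerA, pvHeadsOf, List.filterMap_nil, List.append_nil]
      exact (List.take_of_length_le (le_of_lt hlen)).symm
    · intro _
      simp [pvInnerA]
  | cons src rest ih =>
    obtain ⟨hsrc_nr, hrest_nd⟩ := List.nodup_cons.mp hksnd
    obtain ⟨p0, hp0, hp0k⟩ := List.mem_map.mp (hks src (by simp))
    have hfind : its.find? (fun q => q.1 == src) = some p0 := hp0k ▸ pvFind_nodup its p0 hnd hp0
    have hget : (PySem.Dict.mk its).get? src = some p0.2 := by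
      simp [PySem.Dict.get?, hfind]
    have hgetD : (PySem.Dict.mk its).getD src [] = p0.2 := by
      simp [PySem.Dict.getD, hget]
    cases hv : p0.2 with
    | nil =>
      have hstep : pvInnerA m (src :: rest) (PySem.Dict.mk its) picked pg
          = pvInnerA m rest (PySem.Dict.mk its) picked pg := by
        rw [pvInnerA, hget, hv]
      have hheads : pvHeadsOf (src :: rest) its = pvHeadsOf rest its := by
        simp [pvHeadsOf, List.filterMap_cons, hgetD, hv]
      obtain ⟨h1, h2, h3⟩ := ih its picked pg hnd (fun k hk => hks k (List.mem_cons_of_mem _ hk)) hrest_nd hlen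
      rw [hstep, hheads]
      refine ⟨h1, h2, ?_⟩
      intro hc
      rw [h3 hc]
      apply List.map_congr_left
      intro p hp
      by_cases hpsrc : p.1 = src
      · have hpeq : p = p0 := by
          have := pvFind_nodup its p hnd hp
          rw [hpsrc, hfind] at this
          exact (Option.some_inj.mp this).symm
        have hp2 : p.2 = [] := by rw [hpeq, hv]
        have hnr : p.1 ∉ rest := hpsrc ▸ hsrc_nr
        have hps : p = (src, []) := by
          rw [hpeq]
          exact Prod.ext hp0k hv
        simp [hpsrc, hnr, hp2, hps]
      · by_cases hpr : p.1 ∈ rest <;> simp [hpsrc, hpr]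
    | cons a t =>
      have hc : (PySem.Dict.mk its).contains src = true := by
        simp only [PySem.Dict.contains, List.any_eq_true]
        exact ⟨p0, hp0, by simp [hp0k]⟩
      have hins : (PySem.Dict.mk its).insert src t
          = PySem.Dict.mk (its.map (fun p => if p.1 == src then (src, t) else p)) := by
        simp [PySem.Dict.insert, hc]
      set its1 := its.map (fun p => if p.1 == src then (src, t) else p) with hits1
      have hstep : pvInnerA m (src :: rest) (PySem.Dict.mk its) picked pg
          = if m ≤ ((picked ++ [a]).length : Int) then (PySem.Dict.mk its1, picked ++ [a], true)
            else pvInnerA m rest (PySem.Dict.mk its1) (picked ++ [a]) true := by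
        simp only [pvInnerA, hget, hv, hins]
      have hheads : pvHeadsOf (src :: rest) its = a :: pvHeadsOf rest its := by
        simp [pvHeadsOf, List.filterMap_cons, hgetD, hv]
      have hheads1 : pvHeadsOf rest its1 = pvHeadsOf rest its := by
        apply List.filterMap_congr
        intro k hk
        have hkne : k ≠ src := fun h => hsrc_nr (h ▸ hk)
        rw [hits1, pvGetD_replace_ne its src t k hkne]
      have hkeys1 : its1.map Prod.fst = its.map Prod.fst := by rw [hits1]; exact pvKeys_replace its src t
      by_cases hbr : m ≤ ((picked ++ [a]).length : Int)
      · rw [hstep, if_pos hbr, hheads]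
        have hM : m.toNat = picked.length + 1 := by
          simp only [List.length_append, List.length_cons, List.length_nil] at hbr
          omega
        refine ⟨?_, by simp, ?_⟩
        · have : picked ++ a :: pvHeadsOf rest its = (picked ++ [a]) ++ pvHeadsOf rest its := by simp
          rw [this, hM, List.take_append_of_le_length (by simp),
            List.take_of_length_le (by simp)]
        · intro hcon
          exfalso
          simp only [List.length_append, List.length_cons] at hcon
          omega
      · have hlen' : (picked ++ [a]).length < m.toNat := by
          simp only [List.length_append, List.length_cons, List.length_nil] at hbr ⊢
          omega
        have hnd1 : (its1.map Prod.fst).Nodup := by rw [hkeys1]; exact hnd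
        have hks1 : ∀ k ∈ rest, k ∈ its1.map Prod.fst := by
          intro k hk
          rw [hkeys1]
          exact hks k (List.mem_cons_of_mem _ hk)
        obtain ⟨h1, h2, h3⟩ := ih its1 (picked ++ [a]) true hnd1 hks1 hrest_nd hlen'
        rw [hstep, if_neg hbr, hheads]
        refine ⟨?_, ?_, ?_⟩
        · rw [h1, hheads1]
          simp
        · rw [h2]
          simp
        · intro hcon
          have hcon' : ((picked ++ [a]) ++ pvHeadsOf rest its1).length < m.toNat := by
            rw [hheads1]
            simpa using hcon
          rw [h3 hcon', hits1, List.map_map]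
          apply List.map_congr_left
          intro p hp
          by_cases hpsrc : p.1 = src
          · have hpeq : p = p0 := by
              have := pvFind_nodup its p hnd hp
              rw [hpsrc, hfind] at this
              exact (Option.some_inj.mp this).symm
            have hbq : (p.1 == src) = true := by simp [hpsrc]
            have hnr : src ∉ rest := hsrc_nr
            have hp2 : p.2 = a :: t := by rw [hpeq, hv]
            simp [Function.comp, hbq, hnr, hpsrc, hp2]
          · have hbq : (p.1 == src) = false := by simp [hpsrc]
            by_cases hpr : p.1 ∈ rest <;> simp [Function.comp, hbq, hpsrc, hpr]

-- ---- the outer while loop ----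
lemma pvOuterA_spec (fuel : Nat) (m : Int) (d : PySem.Dict String (List pvArt))
    (picked : List pvArt) (hm : 0 < m) (hnd : d.keys.Nodup)
    (hfuel : pvSumLen d.values + 1 ≤ fuel) (hlen : picked.length < m.toNat) :
    pvOuterA fuel m d picked = (picked ++ pvRR d.values).take m.toNat := by
  induction fuel generalizing d picked with
  | zero => omega
  | succ fuel ih =>
    obtain ⟨its⟩ := d
    have hvals : (PySem.Dict.mk its).values = its.map Prod.snd := rfl
    have hkeys : (PySem.Dict.mk its).keys = its.map Prod.fst := rfl
    have hnd' : (its.map Prod.fst).Nodup := hnd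
    have hcond : ((picked.length : Int) < m) := by omega
    obtain ⟨h1, h2, h3⟩ := pvInnerA_spec m (its.map Prod.fst) its picked false hnd' (fun k hk => hk) hnd' hlen
    have hho : pvHeadsOf (its.map Prod.fst) its = (its.map Prod.snd).filterMap List.head? :=
      pvHeadsOf_keys its hnd'
    set heads := (its.map Prod.snd).filterMap List.head? with hheadsdef
    rw [pvOuterA]
    rw [if_pos hcond]
    rcases hr : pvInnerA m (its.map Prod.fst) (PySem.Dict.mk its) picked false with ⟨d', picked', progress⟩
    rw [hkeys, hr]
    dsimp only
    rw [hr] at h1 h2 h3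
    simp only at h1 h2 h3
    by_cases hemp : (its.map Prod.snd).all (fun g => g.isEmpty) = true
    · have hhe : heads = [] := by
        rw [hheadsdef, pvHeads_nil_iff]
        exact hemp
      have hpr : progress = false := by rw [h2, hho, hhe]; simp
      have hp' : picked' = picked := by
        rw [h1, hho, hhe, List.append_nil]
        exact List.take_of_length_le (le_of_lt hlen)
      rw [hpr, if_neg (by simp)]
      rw [pvRR, hvals, dif_pos hemp, List.append_nil, hp']
      exact (List.take_of_length_le (le_of_lt hlen)).symm
    · have hne : heads ≠ [] := by
        intro h0
        exact hemp ((pvHeads_nil_iff _).mp (hheadsdef ▸ h0))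
      have hpr : progress = true := by
        rw [h2, hho]
        cases hh : heads with
        | nil => exact absurd hh hne
        | cons x xs => simp [hheadsdef ▸ hh]
      rw [hpr, if_pos rfl]
      rw [pvRR]
      rw [hvals, dif_neg hemp]
      have hhlen : 1 ≤ heads.length := List.length_pos_of_ne_nil hne
      by_cases hfill : (picked ++ heads).length < m.toNat
      · have hp' : picked' = picked ++ heads := by
          rw [h1, hho]
          exact List.take_of_length_le (le_of_lt hfill)
        have hd' : d'.items = its.map (fun p => (p.1, p.2.tail)) := by
          rw [h3 (by rw [hho]; exact hfill)]
          apply List.map_congr_left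
          intro p hp
          simp [List.mem_map_of_mem hp]
        have hd'vals : d'.values = (its.map Prod.snd).map List.tail := by
          simp [PySem.Dict.values, hd', List.map_map, Function.comp]
        have hd'keys : d'.keys = its.map Prod.fst := by
          simp [PySem.Dict.keys, hd', List.map_map, Function.comp]
        have hsum := pvSumLen_tail_add_heads (its.map Prod.snd)
        rw [hp', ih d' (picked ++ heads) (by rw [hd'keys]; exact hnd')
          (by
            rw [hd'vals]
            rw [hvals] at hfuel
            have hh1 : 1 ≤ (List.filterMap List.head? (List.map Prod.snd its)).length := by
              rw [← hheadsdef]; exact hhlen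
            omega) hfill, hd'vals]
        rw [hheadsdef]
        simp [List.append_assoc, List.filterMap_map, Function.comp]
      · have hp' : picked' = (picked ++ heads).take m.toNat := by rw [h1, hho]
        have hp'len : picked'.length = m.toNat := by
          rw [hp', List.length_take, List.length_append]
          simp only [List.length_append] at hfill
          omega
        cases fuel with
        | zero =>
          exfalso
          rw [hvals] at hfuel
          have := pvSumLen_tail_add_heads (its.map Prod.snd)
          have hh1 : 1 ≤ (List.filterMap List.head? (List.map Prod.snd its)).length := by
            rw [← hheadsdef]; exact hhlen
          omega
        | succ fuel' =>
          rw [pvOuterA]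
          have : ¬ ((picked'.length : Int) < m) := by
            rw [hp'len]
            omega
          rw [if_neg this, hp']
          have hge : m.toNat ≤ (picked ++ heads).length := by omega
          conv_rhs => rw [← List.append_assoc, List.take_append_of_le_length hge]

-- ---- B side: the tagged round-robin list projects to pvRR ----
lemma pvHeadsK_map_snd {α : Type} (i j : Nat) (gs : List (List α)) :
    (pvHeadsK i j gs).map Prod.snd = gs.filterMap List.head? := by
  induction gs generalizing j with
  | nil => simp [pvHeadsK]
  | cons g rest ih =>
    cases g with
    | nil => simp [pvHeadsK, ih]
    | cons a t => simp [pvHeadsK, ih]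

lemma pvRRK_map_snd {α : Type} (i : Nat) (gs : List (List α)) :
    (pvRRK i gs).map Prod.snd = pvRR gs := by
  by_cases h : gs.all (fun g => g.isEmpty) = true
  · rw [pvRRK, pvRR, dif_pos h, dif_pos h]
    rfl
  · rw [pvRRK, pvRR, dif_neg h, dif_neg h, List.map_append, pvHeadsK_map_snd,
      pvRRK_map_snd (i + 1) (gs.map List.tail)]
termination_by pvSumLen gs
decreasing_by simpa using pvSumLen_tail_lt gs h

-- ---- B side: key bounds and strictly increasing keys ----
lemma pvMem_headsK {α : Type} {i j : Nat} {gs : List (List α)} {t : (Nat × Nat) × α}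
    (h : t ∈ pvHeadsK i j gs) : t.1.1 = i ∧ j ≤ t.1.2 := by
  induction gs generalizing j with
  | nil => cases h
  | cons g rest ih =>
    cases g with
    | nil =>
      simp only [pvHeadsK, List.head?_nil, Option.map_none, Option.toList_none,
        List.nil_append] at h
      obtain ⟨h1, h2⟩ := ih h
      omega
    | cons a tl =>
      simp only [pvHeadsK, List.head?_cons, Option.map_some, Option.toList_some,
        List.singleton_append, List.mem_cons] at h
      rcases h with rfl | h
      · simp
      · obtain ⟨h1, h2⟩ := ih h
        omega

lemma pvMem_RRK {α : Type} {i : Nat} {gs : List (List α)} {t : (Nat × Nat) × α}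
    (h : t ∈ pvRRK i gs) : i ≤ t.1.1 := by
  by_cases hemp : gs.all (fun g => g.isEmpty) = true
  · rw [pvRRK, dif_pos hemp] at h
    cases h
  · rw [pvRRK, dif_neg hemp] at h
    rcases List.mem_append.mp h with h | h
    · exact le_of_eq (pvMem_headsK h).1.symm
    · have := pvMem_RRK (i := i + 1) (gs := gs.map List.tail) h
      omega
termination_by pvSumLen gs
decreasing_by simpa using pvSumLen_tail_lt gs hemp

lemma pvHeadsK_pairwise {α : Type} (i j : Nat) (gs : List (List α)) :
    List.Pairwise (fun a b => (toLex a.1 : Lex (Nat × Nat)) < toLex b.1) (pvHeadsK i j gs) := by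
  induction gs generalizing j with
  | nil => simp [pvHeadsK]
  | cons g rest ih =>
    cases g with
    | nil =>
      simpa [pvHeadsK] using ih (j + 1)
    | cons a tl =>
      simp only [pvHeadsK, List.head?_cons, Option.map_some, Option.toList_some,
        List.singleton_append]
      rw [List.pairwise_cons]
      refine ⟨?_, ih (j + 1)⟩
      intro b hb
      obtain ⟨hb1, hb2⟩ := pvMem_headsK hb
      rw [Prod.Lex.toLex_lt_toLex]
      refine Or.inr ⟨by simp [hb1], ?_⟩
      have : j < b.1.2 := by omega
      simpa using this

lemma pvRRK_pairwise {α : Type} (i : Nat) (gs : List (List α)) :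
    List.Pairwise (fun a b => (toLex a.1 : Lex (Nat × Nat)) < toLex b.1) (pvRRK i gs) := by
  by_cases hemp : gs.all (fun g => g.isEmpty) = true
  · rw [pvRRK, dif_pos hemp]
    exact List.Pairwise.nil
  · rw [pvRRK, dif_neg hemp]
    rw [List.pairwise_append]
    refine ⟨pvHeadsK_pairwise i 0 gs, pvRRK_pairwise (i + 1) (gs.map List.tail), ?_⟩
    intro a ha b hb
    have ha1 := (pvMem_headsK ha).1
    have hb1 := pvMem_RRK hb
    rw [Prod.Lex.toLex_lt_toLex]
    left
    omega
termination_by pvSumLen gs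
decreasing_by all_goals simpa using pvSumLen_tail_lt gs hemp

-- ---- B side: the tagged round-robin list is a permutation of B's flat list ----
lemma pvFlatB_all_empty {α : Type} (i j : Nat) (gs : List (List α))
    (h : gs.all (fun g => g.isEmpty) = true) : pvFlatB i j gs = [] := by
  induction gs generalizing j with
  | nil => rfl
  | cons g rest ih =>
    simp only [List.all_cons, Bool.and_eq_true] at h
    have hg : g = [] := by
      cases g with
      | nil => rfl
      | cons a t => simp at h
    rw [pvFlatB, hg]
    simpa using ih (j + 1) h.2

lemma pvHeadsK_flatB_perm {α : Type} (i j : Nat) (gs : List (List α)) :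
    (pvHeadsK i j gs ++ pvFlatB (i + 1) j (gs.map List.tail)).Perm (pvFlatB i j gs) := by
  induction gs generalizing j with
  | nil => simp [pvHeadsK, pvFlatB]
  | cons g rest ih =>
    cases g with
    | nil =>
      simp only [pvHeadsK, List.head?_nil, Option.map_none, Option.toList_none,
        List.nil_append, List.map_cons, List.tail_nil, pvFlatB, List.zipIdx_nil,
        List.map_nil]
      exact ih (j + 1)
    | cons a tl =>
      simp only [pvHeadsK, List.head?_cons, Option.map_some, Option.toList_some,
        List.map_cons, List.tail_cons, pvFlatB, List.zipIdx_cons, List.singleton_append]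
      rw [List.cons_append]
      apply List.Perm.cons
      apply List.Perm.trans (l₂ := (tl.zipIdx (i + 1)).map (fun ai => ((ai.2, j), ai.1)) ++ (pvHeadsK i (j + 1) rest ++ pvFlatB (i + 1) (j + 1) (rest.map List.tail)))
      · rw [← List.append_assoc, ← List.append_assoc]
        exact List.Perm.append_right _ List.perm_append_comm
      · exact List.Perm.append_left _ (ih (j + 1))

lemma pvRRK_perm_flatB {α : Type} (i : Nat) (gs : List (List α)) :
    (pvRRK i gs).Perm (pvFlatB i 0 gs) := by
  by_cases hemp : gs.all (fun g => g.isEmpty) = true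
  · rw [pvRRK, dif_pos hemp, pvFlatB_all_empty i 0 gs hemp]
  · rw [pvRRK, dif_neg hemp]
    exact List.Perm.trans
      (List.Perm.append_left _ (pvRRK_perm_flatB (i + 1) (gs.map List.tail)))
      (pvHeadsK_flatB_perm i 0 gs)
termination_by pvSumLen gs
decreasing_by simpa using pvSumLen_tail_lt gs hemp

-- ---- B side: the port's flatMap expression is pvFlatB on the sorted groups ----
lemma pvFlat_port_eq (gs : List (List pvArt)) (j : Nat) :
    (gs.zipIdx j).flatMap (fun gj =>
        ((PySem.List.sorted gj.1 pvPub true).zipIdx).map (fun ai => ((ai.2, gj.2), ai.1)))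
      = pvFlatB 0 j (gs.map (fun g => PySem.List.sorted g pvPub true)) := by
  induction gs generalizing j with
  | nil => rfl
  | cons g rest ih =>
    simp only [List.zipIdx_cons, List.flatMap_cons, List.map_cons, pvFlatB]
    rw [ih (j + 1)]

-- ===== VERDICT (by name: the statement is the Claim_ definition above) =====
theorem sample_cluster_py_spec : Claim_equal_sample_cluster_py := by
  intro arts m _
  unfold Spec_sample_cluster_py
  by_cases hle : ((arts.length : Int) ≤ m)
  · simp [sample_cluster_py, sample_cluster_py_alt, hle]
  · simp only [sample_cluster_py, sample_cluster_py_alt, if_neg hle]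
    by_cases hm : 0 < m
    · -- common data
      have hndG : (pvGroup arts).keys.Nodup := pvGroup_keys_nodup arts
      have hDitems := pvSortVals_items (pvGroup arts) hndG
      have hDvals : (pvSortVals (pvGroup arts)).values
          = (pvGroup arts).values.map (fun g => PySem.List.sorted g pvPub true) := by
        simp [PySem.Dict.values, hDitems, List.map_map, Function.comp]
      have hDkeys : (pvSortVals (pvGroup arts)).keys = (pvGroup arts).keys := by
        simp [PySem.Dict.keys, hDitems, List.map_map, Function.comp]
      set vs := (pvGroup arts).values.map (fun g => PySem.List.sorted g pvPub true) with hvs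
      have hsum : pvSumLen vs = arts.length := by
        rw [hvs, ← pvGroup_sumLen arts]
        unfold pvSumLen
        rw [List.map_map]
        congr 1
        apply List.map_congr_left
        intro g _
        exact (PySem.List.sorted_perm g pvPub true).length_eq
      -- A side
      have hA : pvOuterA (arts.length + 1) m (pvSortVals (pvGroup arts)) []
          = (pvRR vs).take m.toNat := by
        have := pvOuterA_spec (arts.length + 1) m (pvSortVals (pvGroup arts)) []
          hm (hDkeys ▸ hndG) (by rw [hDvals]; omega) (by simp; omega)
        simpa [hDvals] using this
      rw [hA]
      -- B side
      rw [show ((pvGroup arts).values.zipIdx : List (List pvArt × Nat)) = (pvGroup arts).values.zipIdx 0 from rfl]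
      rw [pvFlat_port_eq (pvGroup arts).values 0, ← hvs]
      have hsrt : PySem.List.sorted (pvFlatB 0 0 vs) (fun t => (toLex t.1 : Lex (Nat × Nat)))
          = pvRRK 0 vs :=
        PySem.List.sorted_eq_of_perm_of_pairwise_lt _ _ _ (pvRRK_perm_flatB 0 vs)
          (pvRRK_pairwise 0 vs)
      rw [hsrt]
      rw [PySem.List.slice_to _ (by omega : (0:Int) ≤ max 0 m)]
      have hmax : (max 0 m).toNat = m.toNat := by omega
      rw [hmax]
      rw [show (fun (t : (Nat × Nat) × pvArt) => t.2) = Prod.snd from rfl]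
      rw [List.map_take, pvRRK_map_snd]
    · -- max_articles ≤ 0: A's while loop never runs, B takes a 0-prefix
      have hA : pvOuterA (arts.length + 1) m (pvSortVals (pvGroup arts)) [] = [] := by
        rw [pvOuterA]
        rw [if_neg (by simp; omega)]
      rw [hA]
      have hmax : max 0 m = 0 := by omega
      rw [hmax]
      rw [PySem.List.slice_to _ (by omega : (0:Int) ≤ 0)]
      simp
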